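-- pv_equiv track=rewrite | github.com/kaanakgundogdu/adventofcode2025 | day_6/p2.py | solve_cephalopod_math
-- ===== SOURCE A (Python) =====
-- def solve_cephalopod_math(input_text):
--     lines = input_text.split('\n')
--     if lines and not lines[-1].strip():
--         lines.pop()
--
--     if not lines: return 0
--
--     max_len = max(len(line) for line in lines)
--     grid = [line.ljust(max_len) for line in lines]
--     rows = len(grid)
--     cols = max_len
--
--     grand_total = 0
--     current_problem_cols = []
--
--     def process_block(col_indices):
--         if not col_indices: return 0
--
--         operator = None
--         for c in col_indices:
--             char = grid[-1][c]
--             if char not in (' ', '\t'):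
--                 operator = char
--                 break
--
--         numbers = []
--         for c in col_indices:
--             num_str = ""
--             for r in range(rows - 1):
--                 if grid[r][c].isdigit():
--                     num_str += grid[r][c]
--
--             if num_str:
--                 numbers.append(int(num_str))
--
--         if not numbers: return 0
--
--         result = numbers[0]
--         for i in range(1, len(numbers)):
--             if operator == '+':
--                 result += numbers[i]
--             elif operator == '*':
--                 result *= numbers[i]
--
--         return result
--
--     for x in range(cols - 1, -1, -1):
--         is_separator = True
--         for r in range(rows):
--             if grid[r][x] != ' ':
--                 is_separator = False
--                 break
--
--         if is_separator:
--             if current_problem_cols: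
--                 grand_total += process_block(current_problem_cols)
--                 current_problem_cols = []
--         else:
--             current_problem_cols.append(x)
--
--     if current_problem_cols:
--         grand_total += process_block(current_problem_cols)
--
--     return grand_total
-- ===== SOURCE B (Python) =====
-- def solve_cephalopod_math(input_text):
--     lines = input_text.split('\n')
--     if lines and not lines[-1].strip():
--         lines.pop()
--     if not lines:
--         return 0
--     width = max(len(line) for line in lines)
--     grid = [line.ljust(width) for line in lines]
--     last = grid[-1]
--     body = grid[:-1]
--
--     # single pass over columns: keep running sum, product, last number and the
--     # operator seen so far; flush the finished problem at each separator column
--     total = 0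
--     s, p, l, any_num, op = 0, 1, 0, False, None
--     for x in range(width):
--         if all(row[x] == ' ' for row in grid):
--             if any_num:
--                 total += s if op == '+' else p if op == '*' else l
--             s, p, l, any_num, op = 0, 1, 0, False, None
--             continue
--         ch = last[x]
--         if ch not in (' ', '\t'):
--             op = ch
--         ds = ''.join(row[x] for row in body if row[x].isdigit())
--         if ds:
--             n = int(ds)
--             s += n
--             p *= n
--             l = n
--             any_num = True
--     if any_num:
--         total += s if op == '+' else p if op == '*' else l
--     return total
-- ===== Notes on version B (the rewrite author's own statement) =====
-- stated objective: alternative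
-- what changed: A collects each block's column indices in a right-to-left scan and then evaluates the block in separate passes (operator search, number list, fold); B is a single left-to-right streaming pass over columns that never materialises blocks or number lists: it maintains a running sum, product, last number, any-number flag and current operator simultaneously, and flushes that accumulator into the total at each separator column.
import Mathlib
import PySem

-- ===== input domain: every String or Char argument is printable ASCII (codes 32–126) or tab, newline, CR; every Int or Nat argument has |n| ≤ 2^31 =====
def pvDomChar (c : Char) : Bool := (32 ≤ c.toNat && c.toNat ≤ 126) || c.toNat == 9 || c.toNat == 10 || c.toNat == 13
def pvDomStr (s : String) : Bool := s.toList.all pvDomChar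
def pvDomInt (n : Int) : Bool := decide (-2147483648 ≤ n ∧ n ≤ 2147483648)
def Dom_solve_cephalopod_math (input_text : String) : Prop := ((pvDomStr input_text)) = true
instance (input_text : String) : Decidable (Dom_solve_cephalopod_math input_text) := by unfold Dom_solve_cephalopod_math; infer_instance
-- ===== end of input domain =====

-- B replaces A's collect-a-block-then-evaluate-in-passes scheme by one left-to-right streaming
-- pass over the columns that keeps a running sum/product/last-number/operator accumulator and
-- flushes it at each separator column (objective: alternative decomposition, same cost).

-- ===== PORT A =====
-- line.ljust(max_len): pad on the right with spaces (exact: width ≥ len at every use site)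
def pvLjustA (n : Nat) (l : List Char) : List Char := l ++ List.replicate (n - l.length) ' '

-- lines = input_text.split('\n'); pop a trailing blank line
def pvLinesA (input_text : String) : List (List Char) :=
  let lines0 := PySem.Chars.splitOn input_text.toList ['\n']
  if lines0 ≠ [] ∧ PySem.Chars.strip (PySem.List.pyGetD lines0 (-1) []) = []
  then lines0.dropLast else lines0

-- grid[r][c] (r = -1 for grid[-1]); every use has the indices in range, default unreachable
def pvAtA (grid : List (List Char)) (r : Int) (c : Int) : Char :=
  PySem.List.pyGetD (PySem.List.pyGetD grid r []) c ' '

-- the operator loop with break: first column in col_indices whose last-row char is not ' '/'\t'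
def pvFindOpA (grid : List (List Char)) : List Int → Option Char
  | [] => none
  | c :: cs =>
    let ch := pvAtA grid (-1) c
    if ch ≠ ' ' ∧ ch ≠ '\t' then some ch else pvFindOpA grid cs

-- num_str accumulation over r in range(rows-1)
def pvDigitsA (grid : List (List Char)) (rows : Nat) (c : Int) : List Char :=
  (List.range (rows - 1)).foldl
    (fun s (r : Nat) => if PySem.Chars.isdigit (pvAtA grid (r : Int) c) then s ++ [pvAtA grid (r : Int) c] else s) []

def pvProcessBlockA (grid : List (List Char)) (rows : Nat) (d : List Int) : Int :=
  if d = [] then 0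
  else
    let op := pvFindOpA grid d
    let numbers := d.foldl (fun ns c =>
      let numStr := pvDigitsA grid rows c
      -- int(num_str): guarded by num_str nonempty (all digits), so the getD default is unreachable
      if numStr ≠ [] then ns ++ [(PySem.Int.ofChars? numStr).getD 0] else ns) []
    match numbers with
    | [] => 0
    | n0 :: rest =>
      rest.foldl (fun res n =>
        if op == some '+' then res + n else if op == some '*' then res * n else res) n0

-- the is_separator loop with break
def pvIsSepA (grid : List (List Char)) (rows : Nat) (x : Int) : Bool :=
  (List.range rows).all (fun (r : Nat) => pvAtA grid (r : Int) x == ' ')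

def solve_cephalopod_math (input_text : String) : Int :=
  let lines := pvLinesA input_text
  if lines = [] then 0
  else
    let maxLen := ((lines.map List.length).max?).getD 0  -- max over a nonempty list; getD unreachable
    let grid := lines.map (pvLjustA maxLen)
    let rows := grid.length
    let st := (PySem.List.pyRange ((maxLen : Int) - 1) (-1) (-1)).foldl
      (fun (st : Int × List Int) x =>
        if pvIsSepA grid rows x then
          (if st.2 ≠ [] then (st.1 + pvProcessBlockA grid rows st.2, []) else st)
        else (st.1, st.2 ++ [x]))
      (0, [])
    st.1 + (if st.2 ≠ [] then pvProcessBlockA grid rows st.2 else 0)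

-- ===== PORT B =====
def pvLjustB (n : Nat) (l : List Char) : List Char := l ++ List.replicate (n - l.length) ' '

def pvLinesB (input_text : String) : List (List Char) :=
  let lines0 := PySem.Chars.splitOn input_text.toList ['\n']
  if lines0 ≠ [] ∧ PySem.Chars.strip (PySem.List.pyGetD lines0 (-1) []) = []
  then lines0.dropLast else lines0

-- the streaming accumulator: total so far, and the current problem's running
-- sum / product / last number / any-number flag / operator
structure PvStB where
  total : Int
  s : Int
  p : Int
  l : Int
  anyNum : Bool
  op : Option Char
  deriving Repr, DecidableEq

-- one column of Source B's loop body
def pvStepB (grid : List (List Char)) (last : List Char) (body : List (List Char)) (st : PvStB) (x : Int) : PvStB :=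
  if grid.all (fun row => PySem.List.pyGetD row x ' ' == ' ') then
    { total := st.total + (if st.anyNum then
        (if st.op == some '+' then st.s else if st.op == some '*' then st.p else st.l) else 0),
      s := 0, p := 1, l := 0, anyNum := false, op := none }
  else
    let ch := PySem.List.pyGetD last x ' '
    let op' := if ch ≠ ' ' ∧ ch ≠ '\t' then some ch else st.op
    let ds := (body.map (fun row => PySem.List.pyGetD row x ' ')).filter PySem.Chars.isdigit
    if ds ≠ [] then
      let n := (PySem.Int.ofChars? ds).getD 0  -- int(ds); ds nonempty all-digit, default unreachable
      { total := st.total, s := st.s + n, p := st.p * n, l := n, anyNum := true, op := op' }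
    else
      { st with op := op' }

def solve_cephalopod_math_alt (input_text : String) : Int :=
  let lines := pvLinesB input_text
  if lines = [] then 0
  else
    let width := ((lines.map List.length).max?).getD 0  -- max over a nonempty list; getD unreachable
    let grid := lines.map (pvLjustB width)
    let last := PySem.List.pyGetD grid (-1) []
    let body := grid.dropLast
    let st := (PySem.List.pyRange 0 (width : Int) 1).foldl (pvStepB grid last body)
      { total := 0, s := 0, p := 1, l := 0, anyNum := false, op := none }
    if st.anyNum then
      st.total + (if st.op == some '+' then st.s else if st.op == some '*' then st.p else st.l)
    else st.total

-- ===== PRECONDITION & SPEC =====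
def Spec_solve_cephalopod_math (input_text : String) (out : Int) : Prop := out = solve_cephalopod_math_alt input_text
instance (input_text : String) (out : Int) : Decidable (Spec_solve_cephalopod_math input_text out) := by unfold Spec_solve_cephalopod_math; infer_instance

-- ===== CLAIM (what is proved, stated in full; the proofs are below) =====
def Claim_equal_solve_cephalopod_math : Prop := ∀ (input_text : String), Dom_solve_cephalopod_math input_text → Spec_solve_cephalopod_math input_text (solve_cephalopod_math input_text)

-- ===== LEMMAS AND PROOFS =====

-- A's scan, as a recursion over the (descending) column list with state (total, pending block)
def pvFA (p : Int → Bool) (P : List Int → Int) : List Int → Int → List Int → Int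
  | [], t, cur => t + (if cur ≠ [] then P cur else 0)
  | x :: M, t, cur =>
    if p x then (if cur ≠ [] then pvFA p P M (t + P cur) [] else pvFA p P M t cur)
    else pvFA p P M t (cur ++ [x])

-- block decomposition of an ascending column list (runs of non-separator columns)
def pvGB (p : Int → Bool) (V : List Int → Int) : List Int → Int
  | [] => 0
  | x :: xs =>
    if p x then pvGB p V xs
    else V (x :: xs.takeWhile (fun c => !p c)) + pvGB p V (xs.dropWhile (fun c => !p c))
  termination_by L => L.length
  decreasing_by
    all_goals
      have h := List.length_dropWhile_le (fun c => !p c) xs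
      simp only [List.length_cons]
      omega

theorem pvFA_eq_foldl (p : Int → Bool) (P : List Int → Int) (M : List Int) (t : Int) (cur : List Int) :
    ((M.foldl (fun (st : Int × List Int) x =>
        if p x then (if st.2 ≠ [] then (st.1 + P st.2, []) else st) else (st.1, st.2 ++ [x])) (t, cur)).1
      + (if (M.foldl (fun (st : Int × List Int) x =>
        if p x then (if st.2 ≠ [] then (st.1 + P st.2, []) else st) else (st.1, st.2 ++ [x])) (t, cur)).2 ≠ []
         then P ((M.foldl (fun (st : Int × List Int) x =>
        if p x then (if st.2 ≠ [] then (st.1 + P st.2, []) else st) else (st.1, st.2 ++ [x])) (t, cur)).2) else 0))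
    = pvFA p P M t cur := by
  induction M generalizing t cur with
  | nil => simp [pvFA]
  | cons x M ih =>
    simp only [List.foldl_cons, pvFA]
    by_cases hp : p x <;> by_cases hc : cur ≠ [] <;> simp [hp, hc, ← ih]

theorem pvFA_add (p : Int → Bool) (P : List Int → Int) (M : List Int) (t : Int) (cur : List Int) :
    pvFA p P M t cur = t + pvFA p P M 0 cur := by
  induction M generalizing t cur with
  | nil => simp [pvFA]
  | cons x M ih =>
    simp only [pvFA]
    split_ifs with hp hc
    · rw [ih (t + P cur) [], ih (0 + P cur) []]; ring
    · exact ih t cur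
    · exact ih t (cur ++ [x])

theorem pvFA_trailsep (p : Int → Bool) (P : List Int → Int) {y : Int} (hy : p y) (M : List Int) (t : Int) (cur : List Int) :
    pvFA p P (M ++ [y]) t cur = pvFA p P M t cur := by
  induction M generalizing t cur with
  | nil =>
    by_cases hc : cur ≠ [] <;> simp [pvFA, hy, hc]
  | cons x M ih =>
    by_cases hp : p x <;> by_cases hc : cur ≠ [] <;> simp [pvFA, hp, hc, ih]

theorem pvFA_sepmid (p : Int → Bool) (P : List Int → Int) {y : Int} (hy : p y) (M M' : List Int) (t : Int) (cur : List Int) :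
    pvFA p P (M ++ y :: M') t cur = pvFA p P M t cur + pvFA p P M' 0 [] := by
  induction M generalizing t cur with
  | nil =>
    simp only [List.nil_append, pvFA]
    rw [if_pos hy]
    by_cases hc : cur ≠ []
    · rw [if_pos hc, if_pos hc, pvFA_add p P M' (t + P cur) []]
      try ring
    · rw [if_neg hc, if_neg hc, not_not.mp hc, pvFA_add p P M' t []]
      try ring
  | cons x M ih =>
    by_cases hp : p x <;> by_cases hc : cur ≠ [] <;> simp [pvFA, hp, hc, ih]

theorem pvFA_nonsep (p : Int → Bool) (P : List Int → Int) (N : List Int) (h : ∀ x ∈ N, p x = false) (t : Int) (cur : List Int) :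
    pvFA p P N t cur = t + (if cur ++ N ≠ [] then P (cur ++ N) else 0) := by
  induction N generalizing cur with
  | nil => simp [pvFA]
  | cons x N ih =>
    have hx : p x = false := h x (by simp)
    have h' : ∀ z ∈ N, p z = false := fun z hz => h z (by simp [hz])
    simp only [pvFA, hx, Bool.false_eq_true, if_false]
    rw [ih h']
    simp

-- the core correspondence for A: the right-to-left scan = sum over ascending runs
theorem pvKey (p : Int → Bool) (P : List Int → Int) :
    ∀ (n : Nat) (L : List Int), L.length ≤ n →
      pvFA p P L.reverse 0 [] = pvGB p (fun run => P run.reverse) L := by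
  intro n
  induction n with
  | zero =>
    intro L hL
    have : L = [] := List.length_eq_zero_iff.mp (Nat.le_zero.mp hL)
    subst this; simp [pvFA, pvGB]
  | succ n ih =>
    intro L hL
    match L with
    | [] => simp [pvFA, pvGB]
    | x :: L' =>
      by_cases hp : p x
      · rw [pvGB]; simp only [hp, if_true]
        rw [List.reverse_cons, pvFA_trailsep p P hp]
        exact ih L' (by simp at hL; omega)
      · rw [pvGB]; simp only [hp, Bool.false_eq_true, if_false]
        have hsp : L'.takeWhile (fun c => !p c) ++ L'.dropWhile (fun c => !p c) = L' :=
          List.takeWhile_append_dropWhile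
        cases hbe : L'.dropWhile (fun c => !p c) with
        | nil =>
          have hLa : L' = L'.takeWhile (fun c => !p c) := by
            conv_lhs => rw [← hsp]
            rw [hbe, List.append_nil]
          have hN : ∀ z ∈ (L'.takeWhile (fun c => !p c)).reverse ++ [x], p z = false := by
            intro z hz
            rcases List.mem_append.mp hz with hz | hz
            · simpa using List.mem_takeWhile_imp (List.mem_reverse.mp hz)
            · simp at hz; subst hz; simpa using hp
          have hrev : (x :: L').reverse = (L'.takeWhile (fun c => !p c)).reverse ++ [x] := by
            conv_lhs => rw [List.reverse_cons, hLa]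
          rw [hrev, pvFA_nonsep p P _ hN, pvGB]
          simp
        | cons y b' =>
          have hpy : p y := by
            have h2 : L'.dropWhile (fun c => !p c) ≠ [] := by simp [hbe]
            have := List.head_dropWhile_not (fun c => !p c) h2
            simp [hbe] at this; exact this
          have hN : ∀ z ∈ (L'.takeWhile (fun c => !p c)).reverse ++ [x], p z = false := by
            intro z hz
            rcases List.mem_append.mp hz with hz | hz
            · simpa using List.mem_takeWhile_imp (List.mem_reverse.mp hz)
            · simp at hz; subst hz; simpa using hp
          have hrev : (x :: L').reverse =
              b'.reverse ++ y :: ((L'.takeWhile (fun c => !p c)).reverse ++ [x]) := by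
            conv_lhs => rw [List.reverse_cons, ← hsp, hbe]
            simp [List.reverse_append]
          have hlb : b'.length ≤ n := by
            have h1 := List.length_dropWhile_le (fun c => !p c) L'
            rw [hbe] at h1
            simp at h1 hL; omega
          rw [hrev, pvFA_sepmid p P hpy, pvFA_nonsep p P _ hN, ih b' hlb, pvGB]
          simp only [hpy, if_true]
          simp [add_comm]

-- per-column data of a grid, used to characterise B's accumulator
def pvDigitsC (grid : List (List Char)) (c : Int) : List Char :=
  (grid.dropLast.map (fun row => PySem.List.pyGetD row c ' ')).filter PySem.Chars.isdigit

def pvNumC (grid : List (List Char)) (c : Int) : Option Int :=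
  if pvDigitsC grid c ≠ [] then some ((PySem.Int.ofChars? (pvDigitsC grid c)).getD 0) else none

def pvOpC (grid : List (List Char)) (c : Int) : Option Char :=
  let ch := PySem.List.pyGetD (PySem.List.pyGetD grid (-1) []) c ' '
  if ch ≠ ' ' ∧ ch ≠ '\t' then some ch else none

def pvP (grid : List (List Char)) (x : Int) : Bool :=
  grid.all (fun row => PySem.List.pyGetD row x ' ' == ' ')

-- the flushed contribution of an accumulator
def pvFlushD (st : PvStB) : Int :=
  if st.anyNum then (if st.op == some '+' then st.s else if st.op == some '*' then st.p else st.l) else 0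

-- B's step, abstracted over the per-column data
def pvStepAbs (p : Int → Bool) (opc : Int → Option Char) (num : Int → Option Int)
    (st : PvStB) (x : Int) : PvStB :=
  if p x then
    { total := st.total + pvFlushD st, s := 0, p := 1, l := 0, anyNum := false, op := none }
  else
    match num x with
    | some n => { total := st.total, s := st.s + n, p := st.p * n, l := n, anyNum := true,
                  op := (opc x).or st.op }
    | none => { st with op := (opc x).or st.op }

-- the value of one ascending run, in closed form
def pvValAbs (opc : Int → Option Char) (num : Int → Option Int) (run : List Int) : Int :=
  let nums := run.filterMap num
  let op := run.reverse.findSome? opc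
  if nums = [] then 0
  else if op == some '+' then nums.sum
  else if op == some '*' then nums.prod
  else nums.getLastD 0

theorem pvStepB_eq_abs (grid : List (List Char)) (st : PvStB) (x : Int) :
    pvStepB grid (PySem.List.pyGetD grid (-1) []) grid.dropLast st x
      = pvStepAbs (pvP grid) (pvOpC grid) (pvNumC grid) st x := by
  simp only [pvStepB, pvStepAbs, pvP, pvOpC, pvNumC, pvDigitsC, pvFlushD]
  split_ifs <;> simp_all [Option.or]

-- small list helpers (proved here to keep the bridge self-contained)
theorem pv_or_assoc (a b c : Option Char) : (a.or b).or c = a.or (b.or c) := by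
  cases a <;> rfl

theorem pv_findSome?_snoc (f : Int → Option Char) (l : List Int) (a : Int) :
    (l ++ [a]).findSome? f = (l.findSome? f).or (f a) := by
  induction l with
  | nil => cases h : f a <;> simp [List.findSome?, h, Option.or]
  | cons x xs ih => cases h : f x <;> simp [h, ih, Option.or]

theorem pv_getLastD_cons (a : Int) (l : List Int) (d : Int) : (a :: l).getLastD d = l.getLastD a := by
  cases l <;> rfl

theorem pv_sum_reverse (l : List Int) : l.reverse.sum = l.sum := by
  induction l with
  | nil => rfl
  | cons a l ih => simp [List.sum_append, ih]; ring

theorem pv_prod_reverse (l : List Int) : l.reverse.prod = l.prod := by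
  induction l with
  | nil => rfl
  | cons a l ih => simp [List.prod_append, ih]; ring

theorem pv_filterMap_reverse (f : Int → Option Int) (l : List Int) :
    l.reverse.filterMap f = (l.filterMap f).reverse := by
  induction l with
  | nil => rfl
  | cons a l ih => cases h : f a <;> simp [List.filterMap_append, ih, h]

theorem pv_headD_reverse (l : List Int) (d : Int) : l.reverse.headD d = l.getLastD d := by
  induction l generalizing d with
  | nil => rfl
  | cons a l ih =>
    rw [List.reverse_cons, pv_getLastD_cons]
    cases hl : l.reverse with
    | nil =>
      have : l = [] := by simpa using congrArg List.reverse hl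
      subst this; rfl
    | cons b bs =>
      have : l.getLastD a = l.reverse.headD a := (ih a).symm
      rw [this, hl]; rfl

-- B1: the effect of a whole non-separator run on the accumulator, in closed form
theorem pvRun_closed (p : Int → Bool) (opc : Int → Option Char) (num : Int → Option Int) :
    ∀ (run : List Int), (∀ x ∈ run, p x = false) →
      ∀ st, run.foldl (pvStepAbs p opc num) st =
        { total := st.total,
          s := st.s + (run.filterMap num).sum,
          p := st.p * (run.filterMap num).prod,
          l := (run.filterMap num).getLastD st.l,
          anyNum := st.anyNum || !(run.filterMap num).isEmpty,
          op := (run.reverse.findSome? opc).or st.op } := by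
  intro run
  induction run with
  | nil => intro _ st; simp
  | cons x xs ih =>
    intro h st
    have hx : p x = false := h x (by simp)
    have h' : ∀ z ∈ xs, p z = false := fun z hz => h z (by simp [hz])
    rw [List.foldl_cons]
    have hstep : pvStepAbs p opc num st x =
        match num x with
        | some n => { total := st.total, s := st.s + n, p := st.p * n, l := n, anyNum := true,
                      op := (opc x).or st.op }
        | none => { st with op := (opc x).or st.op } := by
      unfold pvStepAbs; rw [if_neg (by simp [hx])]
    cases hn : num x with
    | some n =>
      rw [hstep, hn, ih h']
      simp only [List.filterMap_cons, hn, List.reverse_cons, pv_findSome?_snoc, pv_or_assoc,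
        List.sum_cons, List.prod_cons, pv_getLastD_cons, List.isEmpty_cons, Bool.not_false,
        Bool.true_or, Bool.or_true]
      first | rfl | ring
    | none =>
      rw [hstep, hn, ih h']
      simp only [List.filterMap_cons, hn, List.reverse_cons, pv_findSome?_snoc, pv_or_assoc]

-- a run started from a fresh accumulator, with its flush value
theorem pvRun_fresh (p : Int → Bool) (opc : Int → Option Char) (num : Int → Option Int)
    (run : List Int) (h : ∀ x ∈ run, p x = false) (t : Int) :
    run.foldl (pvStepAbs p opc num) { total := t, s := 0, p := 1, l := 0, anyNum := false, op := none }
      = { total := t, s := (run.filterMap num).sum, p := (run.filterMap num).prod,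
          l := (run.filterMap num).getLastD 0, anyNum := !(run.filterMap num).isEmpty,
          op := run.reverse.findSome? opc } := by
  rw [pvRun_closed p opc num run h]
  simp [Option.or]
  cases run.reverse.findSome? opc <;> rfl

theorem pvFlush_run (opc : Int → Option Char) (num : Int → Option Int) (run : List Int) (t : Int) :
    pvFlushD { total := t, s := (run.filterMap num).sum, p := (run.filterMap num).prod,
               l := (run.filterMap num).getLastD 0, anyNum := !(run.filterMap num).isEmpty,
               op := run.reverse.findSome? opc } = pvValAbs opc num run := by
  unfold pvFlushD pvValAbs
  cases run.filterMap num <;> simp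

-- B2: the streaming fold equals the sum over ascending runs
theorem pvStream_abs (p : Int → Bool) (opc : Int → Option Char) (num : Int → Option Int) :
    ∀ (n : Nat) (L : List Int), L.length ≤ n → ∀ (t : Int),
      (L.foldl (pvStepAbs p opc num) { total := t, s := 0, p := 1, l := 0, anyNum := false, op := none }).total
        + pvFlushD (L.foldl (pvStepAbs p opc num) { total := t, s := 0, p := 1, l := 0, anyNum := false, op := none })
      = t + pvGB p (pvValAbs opc num) L := by
  intro n
  induction n with
  | zero =>
    intro L hL t
    have : L = [] := List.length_eq_zero_iff.mp (Nat.le_zero.mp hL)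
    subst this; simp [pvGB, pvFlushD]
  | succ n ih =>
    intro L hL t
    match L with
    | [] => simp [pvGB, pvFlushD]
    | x :: xs =>
      by_cases hp : p x
      · rw [pvGB]; simp only [hp, if_true]
        rw [List.foldl_cons]
        have hstep : pvStepAbs p opc num { total := t, s := 0, p := 1, l := 0, anyNum := false, op := none } x
            = { total := t, s := 0, p := 1, l := 0, anyNum := false, op := none } := by
          unfold pvStepAbs; rw [if_pos hp]; simp [pvFlushD]
        rw [hstep]
        exact ih xs (by simp at hL; omega) t
      · rw [pvGB]; simp only [hp, Bool.false_eq_true, if_false]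
        have hq : (x :: xs) = (x :: xs.takeWhile (fun c => !p c)) ++ xs.dropWhile (fun c => !p c) := by
          simp [List.takeWhile_append_dropWhile]
        have hrunmem : ∀ z ∈ (x :: xs.takeWhile (fun c => !p c)), p z = false := by
          intro z hz
          rcases List.mem_cons.mp hz with hz | hz
          · subst hz; simpa using hp
          · simpa using List.mem_takeWhile_imp hz
        conv_lhs => rw [hq]
        rw [List.foldl_append, pvRun_fresh p opc num _ hrunmem]
        cases hbe : xs.dropWhile (fun c => !p c) with
        | nil =>
          rw [List.foldl_nil, pvFlush_run]
          have h0 : pvGB p (pvValAbs opc num) ([] : List Int) = 0 := by rw [pvGB]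
          rw [h0]; ring
        | cons y b' =>
          have hpy : p y = true := by
            have h2 : xs.dropWhile (fun c => !p c) ≠ [] := by simp [hbe]
            have h3 := List.head_dropWhile_not (fun c => !p c) h2
            simp only [hbe, List.head_cons] at h3
            simpa using h3
          rw [List.foldl_cons]
          have hstep : pvStepAbs p opc num
              { total := t, s := ((x :: xs.takeWhile (fun c => !p c)).filterMap num).sum,
                p := ((x :: xs.takeWhile (fun c => !p c)).filterMap num).prod,
                l := ((x :: xs.takeWhile (fun c => !p c)).filterMap num).getLastD 0,
                anyNum := !((x :: xs.takeWhile (fun c => !p c)).filterMap num).isEmpty,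
                op := (x :: xs.takeWhile (fun c => !p c)).reverse.findSome? opc } y
              = { total := t + pvValAbs opc num (x :: xs.takeWhile (fun c => !p c)),
                  s := 0, p := 1, l := 0, anyNum := false, op := none } := by
            unfold pvStepAbs
            rw [if_pos hpy, pvFlush_run]
          rw [hstep]
          have hlb : b'.length ≤ n := by
            have h1 := List.length_dropWhile_le (fun c => !p c) xs
            rw [hbe] at h1
            simp at h1 hL; omega
          rw [ih b' hlb (t + pvValAbs opc num (x :: xs.takeWhile (fun c => !p c)))]
          have hgb : pvGB p (pvValAbs opc num) (y :: b') = pvGB p (pvValAbs opc num) b' := by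
            rw [pvGB]; simp [hpy]
          rw [hgb]
          ring

-- ===== bridge between A's block evaluation and pvValAbs =====
theorem pv_foldl_add (l : List Int) (a : Int) : l.foldl (· + ·) a = a + l.sum := by
  induction l generalizing a with
  | nil => simp
  | cons x l ih => simp [ih, add_assoc]

theorem pv_foldl_mul (l : List Int) (a : Int) : l.foldl (· * ·) a = a * l.prod := by
  induction l generalizing a with
  | nil => simp
  | cons x l ih => simp [ih, mul_assoc]

theorem pv_foldl_const {α : Type} (l : List α) (a : Int) : l.foldl (fun r (_ : α) => r) a = a := by
  induction l generalizing a with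
  | nil => rfl
  | cons x l ih => simp [ih]

theorem pv_map_range_getD {α : Type} (l : List α) (d : α) (n : Nat) (h : n ≤ l.length) :
    (List.range n).map (fun r => l.getD r d) = l.take n := by
  apply List.ext_getElem
  · simp; omega
  · intro i h1 h2
    simp only [List.getElem_map, List.getElem_range, List.getElem_take]
    rw [List.getD_eq_getElem?_getD, List.getElem?_eq_getElem (by simp at h1; omega)]
    rfl

theorem pv_foldl_filter {α : Type} (f : α → Char) (pred : Char → Bool) :
    ∀ (l : List α) (s : List Char),
      l.foldl (fun s r => if pred (f r) then s ++ [f r] else s) s = s ++ (l.map f).filter pred := by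
  intro l
  induction l with
  | nil => simp
  | cons r rs ih =>
    intro s
    by_cases hd : pred (f r) <;> simp [hd, ih]

-- A's digit loop equals the per-column digit list
theorem pvDigits_eq (grid : List (List Char)) (c : Int) :
    pvDigitsA grid grid.length c = pvDigitsC grid c := by
  unfold pvDigitsA
  rw [pv_foldl_filter (fun r : Nat => pvAtA grid (r : Int) c) PySem.Chars.isdigit
    (List.range (grid.length - 1)) []]
  have h3 : (List.range (grid.length - 1)).map (fun r : Nat => pvAtA grid (r : Int) c)
      = grid.dropLast.map (fun row => PySem.List.pyGetD row c ' ') := by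
    have h2 := pv_map_range_getD grid [] (grid.length - 1) (by omega)
    calc (List.range (grid.length - 1)).map (fun r : Nat => pvAtA grid (r : Int) c)
        = ((List.range (grid.length - 1)).map (fun r => grid.getD r [])).map
            (fun row => PySem.List.pyGetD row c ' ') := by
          rw [List.map_map]
          apply List.map_congr_left
          intro r _
          simp [pvAtA]
      _ = _ := by rw [h2, ← List.dropLast_eq_take]
  rw [List.nil_append, h3]
  rfl

-- A's operator search equals findSome? over the per-column operators
theorem pvOp_eq (grid : List (List Char)) (d : List Int) :
    pvFindOpA grid d = d.findSome? (pvOpC grid) := by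
  induction d with
  | nil => rfl
  | cons c cs ih =>
    simp only [pvFindOpA, pvOpC, pvAtA, List.findSome?_cons]
    split_ifs with h
    · rfl
    · exact ih

-- A's numbers loop equals filterMap of the per-column numbers
theorem pvNums_eq (grid : List (List Char)) (d : List Int) :
    d.foldl (fun ns c =>
        let numStr := pvDigitsA grid grid.length c
        if numStr ≠ [] then ns ++ [(PySem.Int.ofChars? numStr).getD 0] else ns) []
    = d.filterMap (pvNumC grid) := by
  have h1 : ∀ (l : List Int) (ns : List Int),
      l.foldl (fun ns c =>
        let numStr := pvDigitsA grid grid.length c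
        if numStr ≠ [] then ns ++ [(PySem.Int.ofChars? numStr).getD 0] else ns) ns
      = ns ++ l.filterMap (pvNumC grid) := by
    intro l
    induction l with
    | nil => simp
    | cons c cs ih =>
      intro ns
      by_cases h : pvDigitsA grid grid.length c = []
      · have hstep : (let numStr := pvDigitsA grid grid.length c
            if numStr ≠ [] then ns ++ [(PySem.Int.ofChars? numStr).getD 0] else ns) = ns := by
          simp [h]
        rw [List.foldl_cons, hstep, ih, List.filterMap_cons]
        rw [pvDigits_eq] at h
        simp [pvNumC, h]
      · have hstep : (let numStr := pvDigitsA grid grid.length c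
            if numStr ≠ [] then ns ++ [(PySem.Int.ofChars? numStr).getD 0] else ns)
            = ns ++ [(PySem.Int.ofChars? (pvDigitsA grid grid.length c)).getD 0] := by
          simp [h]
        rw [List.foldl_cons, hstep, ih, List.filterMap_cons]
        rw [pvDigits_eq] at h ⊢
        simp [pvNumC, h, List.append_assoc]
  simpa using h1 d []

-- A's block evaluation on the descending column list equals pvValAbs on the ascending run
theorem pvProcess_eq_val (grid : List (List Char)) (run : List Int) :
    pvProcessBlockA grid grid.length run.reverse = pvValAbs (pvOpC grid) (pvNumC grid) run := by
  unfold pvProcessBlockA pvValAbs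
  by_cases hr : run.reverse = []
  · have h0 : run = [] := by simpa using congrArg List.reverse hr
    subst h0; simp
  · rw [if_neg hr]
    rw [pvNums_eq, pvOp_eq, pv_filterMap_reverse]
    cases hnums : run.filterMap (pvNumC grid) with
    | nil => simp
    | cons a as =>
      have hne : (a :: as).reverse ≠ [] := by simp
      cases hrev : (a :: as).reverse with
      | nil => exact absurd hrev hne
      | cons n0 rest =>
        simp only [reduceCtorEq, ite_false]
        have hsum : n0 + rest.sum = (a :: as).sum := by
          have := pv_sum_reverse (a :: as)
          rw [hrev] at this
          simpa [List.sum_cons] using this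
        have hprod : n0 * rest.prod = (a :: as).prod := by
          have := pv_prod_reverse (a :: as)
          rw [hrev] at this
          simpa [List.prod_cons] using this
        have hlast : n0 = (a :: as).getLastD 0 := by
          have := pv_headD_reverse (a :: as) 0
          rw [hrev] at this
          simpa using this
        by_cases hplus : run.reverse.findSome? (pvOpC grid) == some '+'
        · simp only [hplus, if_true]
          rw [pv_foldl_add rest n0]
          exact hsum
        · by_cases hmul : run.reverse.findSome? (pvOpC grid) == some '*'
          · simp only [hplus, hmul, if_true, if_false, Bool.false_eq_true]
            rw [pv_foldl_mul rest n0]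
            exact hprod
          · simp only [hplus, hmul, if_false, Bool.false_eq_true]
            rw [pv_foldl_const rest n0]
            exact hlast

-- all over index range = all over the list
theorem pv_all_range_getD {α : Type} (l : List α) (d : α) (q : α → Bool) :
    (List.range l.length).all (fun r => q (l.getD r d)) = l.all q := by
  induction l with
  | nil => rfl
  | cons x xs ih =>
    simp only [List.length_cons, List.range_succ_eq_map, List.all_cons, List.all_map]
    rw [← ih]
    simp [Function.comp_def]

-- B's separator test agrees with A's is_separator on every column
theorem pvP_eq (grid : List (List Char)) (x : Int) :
    pvP grid x = pvIsSepA grid grid.length x := by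
  unfold pvP pvIsSepA
  rw [← pv_all_range_getD grid [] (fun row => PySem.List.pyGetD row x ' ' == ' ')]
  simp [pvAtA]

-- B's final flush, written as total + pvFlushD
theorem pvOut_eq (st : PvStB) :
    (if st.anyNum then
      st.total + (if st.op == some '+' then st.s else if st.op == some '*' then st.p else st.l)
     else st.total) = st.total + pvFlushD st := by
  unfold pvFlushD
  by_cases h : st.anyNum <;> simp [h]

-- ===== VERDICT (by name: the statement is the Claim_ definition above) =====
theorem solve_cephalopod_math_spec : Claim_equal_solve_cephalopod_math := by
  intro input_text _
  unfold Spec_solve_cephalopod_math solve_cephalopod_math solve_cephalopod_math_alt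
  have hlines : pvLinesA input_text = pvLinesB input_text := rfl
  rw [← hlines]
  set lines := pvLinesA input_text
  by_cases hL : lines = []
  · simp [hL]
  · simp only [hL, if_false]
    have hljust : pvLjustB = pvLjustA := rfl
    rw [hljust]
    set maxLen := ((lines.map List.length).max?).getD 0
    set grid := lines.map (pvLjustA maxLen) with hgrid
    -- A side: rewrite the foldl as pvFA over the reversed ascending range
    rw [pvFA_eq_foldl (pvIsSepA grid grid.length) (pvProcessBlockA grid grid.length)]
    have hrange : PySem.List.pyRange ((maxLen : Int) - 1) (-1) (-1)
        = (PySem.List.pyRange 0 (maxLen : Int) 1).reverse := by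
      have := PySem.List.pyRange_neg_one_eq_reverse ((maxLen : Int) - 1) (-1)
      simpa using this
    rw [hrange]
    rw [pvKey (pvIsSepA grid grid.length) (pvProcessBlockA grid grid.length)
      (PySem.List.pyRange 0 (maxLen : Int) 1).length _ (le_refl _)]
    -- B side: step = abstract step, then the streaming lemma
    have hstep : pvStepB grid (PySem.List.pyGetD grid (-1) []) grid.dropLast
        = pvStepAbs (pvP grid) (pvOpC grid) (pvNumC grid) := by
      funext st x; exact pvStepB_eq_abs grid st x
    rw [hstep, pvOut_eq]
    rw [pvStream_abs (pvP grid) (pvOpC grid) (pvNumC grid)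
      (PySem.List.pyRange 0 (maxLen : Int) 1).length _ (le_refl _) 0]
    rw [zero_add]
    -- the two pvGB's coincide: same separator predicate, same run values
    have hpfun : pvP grid = pvIsSepA grid grid.length := funext (pvP_eq grid)
    have hvfun : pvValAbs (pvOpC grid) (pvNumC grid)
        = (fun run => pvProcessBlockA grid grid.length run.reverse) := by
      funext run; exact (pvProcess_eq_val grid run).symm
    rw [hpfun, hvfun]
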